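-- pv_equiv track=rewrite | github.com/vladluca70/NumSeq--Python-Library | build/lib/numseq/core.py | perrin_numbers_up_to
-- ===== SOURCE A (Python) =====
-- def perrin_numbers_up_to(n):
--     if n < 0:
--         raise ValueError("the number must be positive")
--     if n==0 :
--         raise ValueError("the number must be greater than 0")
--     perrin_nbrs=[3,0,2]
--     contor=3
--     while True:
--         new_number=perrin_nbrs[contor-2]+perrin_nbrs[contor-3]
--         if new_number<=n:
--             perrin_nbrs.append(new_number)
--             contor+=1
--         else:
--             break
--     return perrin_nbrs
-- ===== SOURCE B (Python) =====
-- def perrin_numbers_up_to(n):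
--     if n < 0:
--         raise ValueError("the number must be positive")
--     if n == 0:
--         raise ValueError("the number must be greater than 0")
--
--     # Companion matrix of x^3 - x - 1 (acting on state rows (P(k), P(k+1), P(k+2)))
--     M = ((0, 0, 1), (1, 0, 1), (0, 1, 0))
--     I = ((1, 0, 0), (0, 1, 0), (0, 0, 1))
--
--     def mat_mul(x, y):
--         return tuple(
--             tuple(sum(x[i][k] * y[k][j] for k in range(3)) for j in range(3))
--             for i in range(3)
--         )
--
--     def mat_pow(p):
--         if p == 0:
--             return I
--         h = mat_pow(p // 2)
--         h2 = mat_mul(h, h)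
--         return mat_mul(h2, M) if p % 2 else h2
--
--     def term(k):
--         # P(k) = first component of (3, 0, 2) . M^k
--         m = mat_pow(k)
--         return 3 * m[0][0] + 0 * m[1][0] + 2 * m[2][0]
--
--     out = [3, 0, 2]
--     k = 3
--     while term(k) <= n:
--         out.append(term(k))
--         k += 1
--     return out
-- ===== Notes on version B (the rewrite author's own statement) =====
-- stated objective: alternative
-- what changed: B drops A's list-extending recurrence entirely: each Perrin term P(k) is computed independently as the first component of (3,0,2) times the k-th binary power of the 3x3 companion matrix of x^3-x-1, appended while <= n; the two ValueError guards are kept.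
import Mathlib
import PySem

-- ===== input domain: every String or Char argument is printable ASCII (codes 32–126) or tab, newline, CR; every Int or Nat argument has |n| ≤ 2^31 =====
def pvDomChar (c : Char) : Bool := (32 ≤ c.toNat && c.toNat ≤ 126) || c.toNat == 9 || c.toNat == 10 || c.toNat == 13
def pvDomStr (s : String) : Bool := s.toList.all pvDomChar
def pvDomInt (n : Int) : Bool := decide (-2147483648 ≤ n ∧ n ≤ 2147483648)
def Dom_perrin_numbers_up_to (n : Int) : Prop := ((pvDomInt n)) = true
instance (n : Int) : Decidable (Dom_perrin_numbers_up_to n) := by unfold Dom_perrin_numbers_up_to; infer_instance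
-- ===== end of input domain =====

-- B computes each Perrin term independently by binary exponentiation of the companion
-- matrix of x^3 - x - 1, instead of A's list-extending recurrence (alternative algorithm).

-- ===== PORT A =====
-- A's 'while True' loop, transliterated with fuel (200 steps, ample for every |n| ≤ 2^31:
-- the fuel only makes the recursion structural; the equivalence lemma holds for every fuel).
def pvLoopA (n : Int) : List Int → Nat → List Int
  | acc, 0 => acc
  | acc, f+1 =>
    let contor : Int := acc.length
    match PySem.List.pyGet? acc (contor - 2), PySem.List.pyGet? acc (contor - 3) with
    | some x, some y =>
      let new_number := x + y
      if new_number ≤ n then pvLoopA n (acc ++ [new_number]) f else acc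
    | _, _ => acc  -- unreachable: acc always holds at least 3 elements

def perrin_numbers_up_to (n : Int) : List Int := pvLoopA n [3, 0, 2] 200

-- ===== PORT B =====
-- 3×3 integer matrices as row triples; pvMatMul is Source B's mat_mul written out entrywise.
abbrev pvMat := (Int × Int × Int) × (Int × Int × Int) × (Int × Int × Int)

def pvM : pvMat := ((0, 0, 1), (1, 0, 1), (0, 1, 0))
def pvI : pvMat := ((1, 0, 0), (0, 1, 0), (0, 0, 1))

def pvMatMul (x y : pvMat) : pvMat :=
  ((x.1.1*y.1.1 + x.1.2.1*y.2.1.1 + x.1.2.2*y.2.2.1,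
    x.1.1*y.1.2.1 + x.1.2.1*y.2.1.2.1 + x.1.2.2*y.2.2.2.1,
    x.1.1*y.1.2.2 + x.1.2.1*y.2.1.2.2 + x.1.2.2*y.2.2.2.2),
   (x.2.1.1*y.1.1 + x.2.1.2.1*y.2.1.1 + x.2.1.2.2*y.2.2.1,
    x.2.1.1*y.1.2.1 + x.2.1.2.1*y.2.1.2.1 + x.2.1.2.2*y.2.2.2.1,
    x.2.1.1*y.1.2.2 + x.2.1.2.1*y.2.1.2.2 + x.2.1.2.2*y.2.2.2.2),
   (x.2.2.1*y.1.1 + x.2.2.2.1*y.2.1.1 + x.2.2.2.2*y.2.2.1,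
    x.2.2.1*y.1.2.1 + x.2.2.2.1*y.2.1.2.1 + x.2.2.2.2*y.2.2.2.1,
    x.2.2.1*y.1.2.2 + x.2.2.2.1*y.2.1.2.2 + x.2.2.2.2*y.2.2.2.2))

-- Source B's recursive binary exponentiation mat_pow
def pvMatPow (p : Nat) : pvMat :=
  if _h : p = 0 then pvI
  else
    let h := pvMatPow (p / 2)
    let h2 := pvMatMul h h
    if p % 2 = 1 then pvMatMul h2 pvM else h2
decreasing_by exact Nat.div_lt_self (Nat.pos_of_ne_zero _h) (by omega)

-- Source B's term(k): first component of (3,0,2) · M^k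
def pvTerm (k : Nat) : Int :=
  let m := pvMatPow k
  3 * m.1.1 + 0 * m.2.1.1 + 2 * m.2.2.1

-- Source B's while loop, with the same fuel convention as A's port
def pvLoopB (n : Int) : Nat → Nat → List Int
  | _, 0 => []
  | k, f+1 => if pvTerm k ≤ n then pvTerm k :: pvLoopB n (k+1) f else []

def perrin_numbers_up_to_alt (n : Int) : List Int := [3, 0, 2] ++ pvLoopB n 3 200

-- ===== PRECONDITION & SPEC =====
-- A raises ValueError on every non-positive n; Pre_ admits exactly the inputs where A returns.
def Pre_perrin_numbers_up_to (n : Int) : Prop := 1 ≤ n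
instance (n : Int) : Decidable (Pre_perrin_numbers_up_to n) := by unfold Pre_perrin_numbers_up_to; infer_instance
def pvWitness_perrin_numbers_up_to : Int := 10

def Spec_perrin_numbers_up_to (n : Int) (out : List Int) : Prop := out = perrin_numbers_up_to_alt n
instance (n : Int) (out : List Int) : Decidable (Spec_perrin_numbers_up_to n out) := by unfold Spec_perrin_numbers_up_to; infer_instance

-- ===== CLAIM (what is proved, stated in full; the proofs are below) =====
def Claim_equal_perrin_numbers_up_to : Prop := ∀ (n : Int), Dom_perrin_numbers_up_to n → Pre_perrin_numbers_up_to n → Spec_perrin_numbers_up_to n (perrin_numbers_up_to n)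

-- ===== LEMMAS AND PROOFS =====

-- Rolling-triple stream of Perrin terms (proof mediator between the two ports)
def pvGen (a b c : Int) : Nat → List Int
  | 0 => []
  | f+1 => (a + b) :: pvGen b c (a + b) f

theorem pvMatMul_assoc (x y z : pvMat) :
    pvMatMul (pvMatMul x y) z = pvMatMul x (pvMatMul y z) := by
  obtain ⟨⟨x11,x12,x13⟩,⟨x21,x22,x23⟩,⟨x31,x32,x33⟩⟩ := x
  obtain ⟨⟨y11,y12,y13⟩,⟨y21,y22,y23⟩,⟨y31,y32,y33⟩⟩ := y
  obtain ⟨⟨z11,z12,z13⟩,⟨z21,z22,z23⟩,⟨z31,z32,z33⟩⟩ := z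
  simp only [pvMatMul, Prod.mk.injEq]
  refine ⟨⟨by ring, by ring, by ring⟩, ⟨by ring, by ring, by ring⟩, by ring, by ring, by ring⟩

theorem pvMatMul_one (x : pvMat) : pvMatMul x pvI = x := by
  obtain ⟨⟨x11,x12,x13⟩,⟨x21,x22,x23⟩,⟨x31,x32,x33⟩⟩ := x
  simp only [pvMatMul, pvI, Prod.mk.injEq]
  refine ⟨⟨by ring, by ring, by ring⟩, ⟨by ring, by ring, by ring⟩, by ring, by ring, by ring⟩

-- naive right-recursive power, the proof-side reference semantics of mat_pow
def pvNp : Nat → pvMat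
  | 0 => pvI
  | k+1 => pvMatMul (pvNp k) pvM

theorem pvNp_add (a b : Nat) : pvNp (a + b) = pvMatMul (pvNp a) (pvNp b) := by
  induction b with
  | zero => simp [pvNp, pvMatMul_one]
  | succ b ih =>
    have h1 : pvNp (a + (b + 1)) = pvMatMul (pvNp (a + b)) pvM := rfl
    have h2 : pvNp (b + 1) = pvMatMul (pvNp b) pvM := rfl
    rw [h1, h2, ih, pvMatMul_assoc]

theorem pvMatPow_eq_np (p : Nat) : pvMatPow p = pvNp p := by
  induction p using Nat.strong_induction_on with
  | _ p ih =>
    rw [pvMatPow]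
    by_cases h : p = 0
    · simp [h, pvNp]
    · have hlt : p / 2 < p := Nat.div_lt_self (Nat.pos_of_ne_zero h) (by omega)
      simp only [h, dif_neg, not_false_iff, ih _ hlt]
      by_cases hm : p % 2 = 1
      · have hp : p = (p / 2 + p / 2) + 1 := by omega
        simp only [hm, if_pos, ← pvNp_add]
        rw [show pvMatMul (pvNp (p / 2 + p / 2)) pvM = pvNp ((p / 2 + p / 2) + 1) from rfl, ← hp]
      · have hp : p = p / 2 + p / 2 := by omega
        simp only [hm, if_neg, not_false_iff, ← pvNp_add, ← hp]

-- (3,0,2)·M^k as a concrete triple; pvVec3 shifts like the Perrin recurrence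
def pvVecMul (v : Int × Int × Int) (m : pvMat) : Int × Int × Int :=
  (v.1*m.1.1 + v.2.1*m.2.1.1 + v.2.2*m.2.2.1,
   v.1*m.1.2.1 + v.2.1*m.2.1.2.1 + v.2.2*m.2.2.2.1,
   v.1*m.1.2.2 + v.2.1*m.2.1.2.2 + v.2.2*m.2.2.2.2)

theorem pvVecMul_matMul (v : Int × Int × Int) (x y : pvMat) :
    pvVecMul v (pvMatMul x y) = pvVecMul (pvVecMul v x) y := by
  obtain ⟨v1, v2, v3⟩ := v
  obtain ⟨⟨x11,x12,x13⟩,⟨x21,x22,x23⟩,⟨x31,x32,x33⟩⟩ := x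
  obtain ⟨⟨y11,y12,y13⟩,⟨y21,y22,y23⟩,⟨y31,y32,y33⟩⟩ := y
  simp only [pvVecMul, pvMatMul, Prod.mk.injEq]
  exact ⟨by ring, by ring, by ring⟩

theorem pvVecMul_M (a b c : Int) : pvVecMul (a, b, c) pvM = (b, c, a + b) := by
  simp only [pvVecMul, pvM]
  refine Prod.ext (by ring) (Prod.ext (by ring) (by ring))

theorem pvTerm_eq (k : Nat) : pvTerm k = (pvVecMul (3, 0, 2) (pvNp k)).1 := by
  simp only [pvTerm, pvMatPow_eq_np, pvVecMul]

-- B's loop unrolls to the ≤-n prefix of the rolling-triple stream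
theorem pvLoopB_eq_gen (n : Int) : ∀ (f j : Nat) (a b c : Int),
    pvVecMul (3, 0, 2) (pvNp j) = (a, b, c) →
    pvLoopB n (j + 3) f = (pvGen a b c f).takeWhile (fun x => decide (x ≤ n)) := by
  intro f
  induction f with
  | zero => intro j a b c _; simp [pvLoopB, pvGen]
  | succ f ih =>
    intro j a b c h
    have hterm : pvTerm (j + 3) = a + b := by
      rw [pvTerm_eq, show j + 3 = ((j + 1) + 1) + 1 from rfl]
      simp only [pvNp, pvVecMul_matMul, h, pvVecMul_M]
    have hnext : pvVecMul (3, 0, 2) (pvNp (j + 1)) = (b, c, a + b) := by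
      simp only [pvNp, pvVecMul_matMul, h, pvVecMul_M]
    rw [pvLoopB, hterm]
    simp only [pvGen, List.takeWhile]
    by_cases hc : a + b ≤ n
    · simp only [hc, decide_true, if_true]
      rw [show j + 3 + 1 = (j + 1) + 3 by omega, ih (j + 1) b c (a + b) hnext]
    · simp [hc]

-- A's loop on a list ending in [p, q, r] appends exactly the ≤-n prefix of the stream
theorem pvLoopA_eq_gen (n : Int) : ∀ (f : Nat) (l : List Int) (p q r : Int),
    pvLoopA n (l ++ [p, q, r]) f
      = (l ++ [p, q, r]) ++ (pvGen p q r f).takeWhile (fun x => decide (x ≤ n)) := by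
  intro f
  induction f with
  | zero => intro l p q r; simp [pvLoopA, pvGen]
  | succ f ih =>
    intro l p q r
    have hlen : ((l ++ [p, q, r]).length : Int) = (l.length : Int) + 3 := by
      simp
    have h2 : PySem.List.pyGet? (l ++ [p, q, r]) (((l ++ [p, q, r]).length : Int) - 2)
        = some q := by
      rw [hlen]
      have : (l.length : Int) + 3 - 2 = ((l ++ [p]).length : Int) := by simp; ring
      rw [this, show l ++ [p, q, r] = (l ++ [p]) ++ q :: [r] by simp]
      exact PySem.List.pyGet?_append_length _ _ _
    have h3 : PySem.List.pyGet? (l ++ [p, q, r]) (((l ++ [p, q, r]).length : Int) - 3)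
        = some p := by
      rw [hlen]
      have : (l.length : Int) + 3 - 3 = (l.length : Int) := by ring
      rw [this, show l ++ [p, q, r] = l ++ p :: [q, r] by simp]
      exact PySem.List.pyGet?_append_length _ _ _
    rw [pvLoopA, h2, h3]
    simp only [pvGen, List.takeWhile]
    by_cases h : q + p ≤ n
    · have h' : p + q ≤ n := by omega
      simp only [h, h', decide_true, if_true]
      have hsplit : (l ++ [p, q, r]) ++ [q + p] = (l ++ [p]) ++ [q, r, p + q] := by
        simp [add_comm q p]
      rw [hsplit, ih (l ++ [p]) q r (p + q)]
      simp
    · have h' : ¬ p + q ≤ n := by omega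
      simp [h, h']

-- ===== VERDICT (by name: the statement is the Claim_ definition above) =====
theorem perrin_numbers_up_to_spec : Claim_equal_perrin_numbers_up_to := by
  intro n _ _
  show perrin_numbers_up_to n = perrin_numbers_up_to_alt n
  have hA := pvLoopA_eq_gen n 200 [] 3 0 2
  have hB := pvLoopB_eq_gen n 200 0 3 0 2 (by decide)
  simp only [perrin_numbers_up_to, perrin_numbers_up_to_alt, List.nil_append] at *
  rw [hA, show (0 : Nat) + 3 = 3 from rfl] at *
  rw [hB]
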